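-- pv_equiv track=rewrite | github.com/ibtosmlin/atcoder | work/agc057_a.py | f
-- ===== SOURCE A (Python) =====
-- def f(l, r):
--     ok = r
--     ng = l-1
--     while ok-ng>1:
--         mid = (ok+ng)//2
--         mst = str(mid)
--         fg = True
--         for i in range(10):
--             if int(mst + str(i)) <=r:
--                 fg = False
--                 break
--             if i and int(str(i) + mst) <=r:
--                 fg = False
--                 break
--         if fg:
--             ok = mid
--         else:
--             ng = mid
--     return r - ng
-- ===== SOURCE B (Python) =====
-- def f(l, r):
--     # closed form: a value x (1 <= x <= r) admits no digit-append/prepend <= r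
--     # iff 10*x > r and 10**len(str(x)) + x > r; both conditions are upward closed,
--     # so count the x in [l, r] above the combined threshold instead of binary searching.
--     if r <= l:
--         return r - l + 1
--     t1 = r // 10 + 1
--     p = 10
--     while True:
--         x = max(p // 10, r - p + 1)
--         if x < p:
--             t2 = x
--             break
--         p *= 10
--     t = max(1, t1, t2)
--     return r - (max(l, min(r, t)) - 1)
-- ===== Notes on version B (the rewrite author's own statement) =====
-- stated objective: faster
-- what changed: Replaces the binary search whose goodness probe builds and re-parses decimal strings by a closed-form count: x in [l,r] is counted iff 10*x > r and 10**len(str(x)) + x > r, both monotone in x, so B computes the combined threshold directly (a short scan over powers of ten for the prepend part) and returns the clamped count.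
import Mathlib
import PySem

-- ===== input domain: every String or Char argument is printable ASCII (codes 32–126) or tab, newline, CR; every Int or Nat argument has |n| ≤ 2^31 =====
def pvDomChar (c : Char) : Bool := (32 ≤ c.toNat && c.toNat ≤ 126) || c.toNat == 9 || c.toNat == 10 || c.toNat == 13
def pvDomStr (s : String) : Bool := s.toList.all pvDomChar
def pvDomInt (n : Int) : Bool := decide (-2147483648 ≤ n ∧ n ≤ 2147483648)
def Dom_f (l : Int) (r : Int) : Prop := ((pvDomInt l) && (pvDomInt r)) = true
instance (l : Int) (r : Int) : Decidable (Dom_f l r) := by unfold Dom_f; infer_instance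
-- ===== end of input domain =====

-- B replaces A's binary search (whose probe builds and re-parses decimal strings) by a
-- direct arithmetic threshold count; the two are proved to return the same value.

-- ===== PORT A =====
-- inner `for i in range(10)` loop of A: returns the flag `fg`
def fInner (r : Int) (mst : String) : List Int → Bool
  | [] => true
  | i :: rest =>
    match PySem.Int.ofStr? (mst ++ PySem.Int.toStr i) with
    | none => false  -- Python would raise ValueError; never reached for the mids A probes
    | some a =>
      if a ≤ r then false
      else if i ≠ 0 then
        match PySem.Int.ofStr? (PySem.Int.toStr i ++ mst) with
        | none => false  -- same remark
        | some b => if b ≤ r then false else fInner r mst rest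
      else fInner r mst rest

-- A's `while ok-ng>1` loop; returns the final value of `ng`
def fLoop (l : Int) (r : Int) (ok : Int) (ng : Int) : Int :=
  if h : ok - ng > 1 then
    let mid := PySem.Int.floordiv (ok + ng) 2
    let mst := PySem.Int.toStr mid
    if fInner r mst (PySem.List.pyRange 0 10 1) then fLoop l r mid ng else fLoop l r ok mid
  else ng
termination_by (ok - ng).toNat
decreasing_by
  · have h1 := (PySem.Int.le_floordiv_iff_mul_le (a := ok + ng) (q := ng + 1) (by norm_num : (0:Int) < 2)).mpr (by omega)
    have h2 := (PySem.Int.floordiv_lt_iff_lt_mul (a := ok + ng) (q := ok) (by norm_num : (0:Int) < 2)).mpr (by omega)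
    omega
  · have h1 := (PySem.Int.le_floordiv_iff_mul_le (a := ok + ng) (q := ng + 1) (by norm_num : (0:Int) < 2)).mpr (by omega)
    have h2 := (PySem.Int.floordiv_lt_iff_lt_mul (a := ok + ng) (q := ok) (by norm_num : (0:Int) < 2)).mpr (by omega)
    omega

def f (l : Int) (r : Int) : Int := r - fLoop l r r (l - 1)

-- ===== PORT B =====
-- Source B's `while True` scan for t2 (the `p < 10` test only makes the recursion well-founded;
-- f_alt always calls this with p = 10, and recursive calls keep p a power of ten ≥ 10)
def altScan (r : Int) (p : Int) : Int :=
  if h : p < 10 then 0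
  else
    let x := max (PySem.Int.floordiv p 10) (r - p + 1)
    if x < p then x else altScan r (p * 10)
termination_by (r - p).toNat
decreasing_by
  have hx : max (PySem.Int.floordiv p 10) (r - p + 1) < p → False := by assumption
  have hd := (PySem.Int.floordiv_lt_iff_lt_mul (a := p) (q := p) (by norm_num : (0:Int) < 10)).mpr (by omega)
  omega

def f_alt (l : Int) (r : Int) : Int :=
  if r ≤ l then r - l + 1
  else
    let t1 := PySem.Int.floordiv r 10 + 1
    let t2 := altScan r 10
    let t := max 1 (max t1 t2)
    r - (max l (min r t) - 1)

-- ===== PRECONDITION & SPEC =====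
def Spec_f (l : Int) (r : Int) (out : Int) : Prop := out = f_alt l r
instance (l : Int) (r : Int) (out : Int) : Decidable (Spec_f l r out) := by unfold Spec_f; infer_instance

-- ===== CLAIM (what is proved, stated in full; the proofs are below) =====
def Claim_equal_f : Prop := ∀ (l : Int) (r : Int), Dom_f l r → Spec_f l r (f l r)

-- ===== LEMMAS AND PROOFS =====

-- ---------- a transparent replica of PySem.Int.ofChars?'s digit parser ----------
-- (PySem's own parser helper is private, so facts about it are obtained through the
-- pointwise equality ofChars_eq below and then proved about this replica)
def myGo : List Char → Bool → Nat → Option Nat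
  | [], afterDigit, acc => if afterDigit = true then some acc else none
  | c :: rest, afterDigit, acc =>
    if c.isDigit = true then myGo rest true (acc * 10 + (c.toNat - '0'.toNat))
    else
      if c = '_' ∧ afterDigit = true then
        match rest with
        | d :: _ => if d.isDigit = true then myGo rest false acc else none
        | [] => none
      else none

def myDigitsVal? : List Char → Option Nat
  | [] => none
  | cs => myGo cs false 0

def myOfChars? (s : List Char) : Option Int :=
  have cs := (List.dropWhile PySem.Int.isIntSpace (List.dropWhile PySem.Int.isIntSpace s).reverse).reverse
  match cs with
  | '-' :: ds =>
    Option.map (fun n => -n) do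
      let a ← myDigitsVal? ds
      pure (↑a : Int)
  | '+' :: ds =>
    Option.map (fun n => n) do
      let a ← myDigitsVal? ds
      pure (↑a : Int)
  | ds =>
    Option.map (fun n => n) do
      let a ← myDigitsVal? ds
      pure (↑a : Int)

theorem ofChars_eq (s : List Char) : PySem.Int.ofChars? s = myOfChars? s := by
  simp only [PySem.Int.ofChars?, myOfChars?]
  generalize (List.dropWhile PySem.Int.isIntSpace (List.dropWhile PySem.Int.isIntSpace s).reverse).reverse = cs
  cases cs with
  | nil => rfl
  | cons c t =>
      congr 1 <;> funext ds <;> congr 1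
      all_goals {
        cases ds with
        | nil => rfl
        | cons c' t' =>
            congr 1
            conv_lhs => whnf
            generalize hI : instDecidableEqBool c'.isDigit true = I
            cases I with
            | isFalse h =>
                simp only []
                rw [if_neg (by simp)]
                simp [myDigitsVal?, myGo, h]
            | isTrue h =>
                simp only []
                simp only [myDigitsVal?, myGo, h, if_pos]
                generalize 0 * 10 + (c'.toNat - '0'.toNat) = a
                generalize (true : Bool) = b
                clear hI h
                induction t' generalizing b a with
                | nil => cases b <;> rfl
                | cons d u ih =>
                    conv_lhs => whnf
                    generalize hJ : instDecidableEqBool d.isDigit true = J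
                    cases J with
                    | isTrue hd =>
                        simp only []
                        simp only [myGo, hd, if_pos]
                        exact ih _ true
                    | isFalse hd =>
                        simp only []
                        simp only [myGo]
                        rw [if_neg hd]
                        by_cases hu : d = '_' ∧ b = true
                        · rw [if_pos hu, if_pos hu]
                          cases u with
                          | nil => rfl
                          | cons e v =>
                              simp only []
                              by_cases he : e.isDigit = true
                              · rw [if_pos he, if_pos he]
                                exact ih _ false
                              · rw [if_neg he, if_neg he]
                        · rw [if_neg hu, if_neg hu]
      }

-- ---------- decimal digit strings ----------
def isDig (c : Char) : Prop := ∃ k, k < 10 ∧ c = Nat.digitChar k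

def dstep (acc : Nat) (c : Char) : Nat := acc * 10 + (c.toNat - '0'.toNat)

def dlen (n : Nat) : Nat := (Nat.toDigits 10 n).length

theorem isDig_toDigits (n : Nat) : ∀ c ∈ Nat.toDigits 10 n, isDig c := by
  induction n using Nat.strong_induction_on with
  | _ n ih =>
    intro c hc
    rw [Nat.toDigits_eq_if (by norm_num)] at hc
    by_cases h : n < 10
    · rw [if_pos h] at hc; simp at hc; exact ⟨n, h, hc⟩
    · rw [if_neg h] at hc
      rcases List.mem_append.mp hc with h1 | h2
      · exact ih (n / 10) (by omega) c h1
      · simp at h2; exact ⟨n % 10, Nat.mod_lt _ (by norm_num), h2⟩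

theorem isDig_isDigit {c : Char} (h : isDig c) : c.isDigit = true := by
  obtain ⟨k, hk, rfl⟩ := h; interval_cases k <;> decide

theorem isDig_not_space {c : Char} (h : isDig c) : ¬ PySem.Int.isIntSpace c = true := by
  obtain ⟨k, hk, rfl⟩ := h; interval_cases k <;> decide

theorem isDig_ne_minus {c : Char} (h : isDig c) : c ≠ '-' := by
  obtain ⟨k, hk, rfl⟩ := h; interval_cases k <;> decide

theorem isDig_ne_plus {c : Char} (h : isDig c) : c ≠ '+' := by
  obtain ⟨k, hk, rfl⟩ := h; interval_cases k <;> decide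

theorem dstep_digitChar (acc k : Nat) (hk : k < 10) :
    dstep acc (Nat.digitChar k) = acc * 10 + k := by
  unfold dstep; interval_cases k <;> rfl

theorem myGo_digits (ds : List Char) (acc : Nat) (h : ∀ c ∈ ds, isDig c) :
    myGo ds true acc = some (ds.foldl dstep acc) := by
  induction ds generalizing acc with
  | nil => rfl
  | cons c t ih =>
      have hc := isDig_isDigit (h c (by simp))
      simp only [myGo, hc, if_pos, List.foldl_cons]
      exact ih _ (fun d hd => h d (by simp [hd]))

theorem myDigitsVal?_digits (ds : List Char) (hne : ds ≠ []) (h : ∀ c ∈ ds, isDig c) :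
    myDigitsVal? ds = some (ds.foldl dstep 0) := by
  cases ds with
  | nil => exact absurd rfl hne
  | cons c t =>
      have hc := isDig_isDigit (h c (by simp))
      simp only [myDigitsVal?, myGo, hc, if_pos, List.foldl_cons]
      exact myGo_digits t _ (fun d hd => h d (by simp [hd]))

theorem dropWhile_of_none (p : Char → Bool) (s : List Char) (h : ∀ c ∈ s, ¬ p c = true) :
    List.dropWhile p s = s := by
  cases s with
  | nil => rfl
  | cons c t => simp [List.dropWhile, h c (by simp)]

theorem strip_id (s : List Char) (h : ∀ c ∈ s, ¬ PySem.Int.isIntSpace c = true) :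
    (List.dropWhile PySem.Int.isIntSpace
      (List.dropWhile PySem.Int.isIntSpace s).reverse).reverse = s := by
  rw [dropWhile_of_none _ s h, dropWhile_of_none _ s.reverse (by simpa using h), List.reverse_reverse]

theorem myOfChars?_digits (ds : List Char) (hne : ds ≠ []) (h : ∀ c ∈ ds, isDig c) :
    myOfChars? ds = some ((ds.foldl dstep 0 : Nat) : Int) := by
  cases ds with
  | nil => exact absurd rfl hne
  | cons c t =>
      have hmem : ∀ x ∈ c :: t, ¬ PySem.Int.isIntSpace x = true := fun x hx => isDig_not_space (h x hx)
      simp only [myOfChars?]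
      rw [strip_id _ hmem]
      split
      · rename_i ds heq
        obtain ⟨hc, -⟩ := List.cons_eq_cons.mp heq
        exact absurd hc (isDig_ne_minus (h c (by simp)))
      · rename_i ds heq
        obtain ⟨hc, -⟩ := List.cons_eq_cons.mp heq
        exact absurd hc (isDig_ne_plus (h c (by simp)))
      · rename_i ds hne1 hne2
        rw [myDigitsVal?_digits _ hne h]
        rfl

theorem myOfChars?_neg_digits (ds : List Char) (hne : ds ≠ []) (h : ∀ c ∈ ds, isDig c) :
    myOfChars? ('-' :: ds) = some (-((ds.foldl dstep 0 : Nat) : Int)) := by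
  have hmem : ∀ x ∈ '-' :: ds, ¬ PySem.Int.isIntSpace x = true := by
    intro x hx
    rcases List.mem_cons.mp hx with rfl | hx
    · decide
    · exact isDig_not_space (h x hx)
  simp only [myOfChars?]
  rw [strip_id _ hmem]
  conv_lhs => whnf
  rw [myDigitsVal?_digits _ hne h]
  rfl

theorem dlen_lt10 {n : Nat} (h : n < 10) : dlen n = 1 := by
  unfold dlen; rw [Nat.toDigits_of_lt_base h]; rfl

theorem dlen_step {n : Nat} (h : ¬ n < 10) : dlen n = dlen (n / 10) + 1 := by
  unfold dlen
  conv_lhs => rw [Nat.toDigits_eq_if (by norm_num : (1:Nat) < 10)]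
  rw [if_neg h, List.length_append]
  rfl

-- value of a digit expansion
theorem foldl_toDigits (n : Nat) : ∀ acc : Nat,
    (Nat.toDigits 10 n).foldl dstep acc = acc * 10 ^ (dlen n) + n := by
  induction n using Nat.strong_induction_on with
  | _ n ih =>
    intro acc
    by_cases h : n < 10
    · rw [Nat.toDigits_of_lt_base h, dlen_lt10 h]
      simp [dstep_digitChar acc n h]
    · conv_lhs => rw [Nat.toDigits_eq_if (by norm_num : (1:Nat) < 10)]
      rw [if_neg h, List.foldl_append, ih (n / 10) (by omega) acc, dlen_step h]
      simp only [List.foldl_cons, List.foldl_nil]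
      rw [dstep_digitChar _ _ (Nat.mod_lt _ (by norm_num))]
      have hdm := Nat.div_add_mod n 10
      ring_nf
      omega

-- digit-length bracketing
theorem dlen_pos (n : Nat) : 0 < dlen n := Nat.length_toDigits_pos

theorem lt_pow_dlen (n : Nat) : n < 10 ^ (dlen n) :=
  (Nat.length_toDigits_le_iff (by norm_num) (dlen_pos n)).mp le_rfl

theorem dlen_le_iff (n k : Nat) (hk : 0 < k) : dlen n ≤ k ↔ n < 10 ^ k :=
  Nat.length_toDigits_le_iff (by norm_num) hk

theorem dlen_mono {m n : Nat} (h : m ≤ n) : dlen m ≤ dlen n := by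
  rw [dlen_le_iff _ _ (dlen_pos n)]
  exact lt_of_le_of_lt h (lt_pow_dlen n)

theorem dlen_eq_succ {n : Nat} {k : Nat} (h1 : 10 ^ k ≤ n) (h2 : n < 10 ^ (k + 1)) :
    dlen n = k + 1 := by
  have hle : dlen n ≤ k + 1 := (dlen_le_iff _ _ (Nat.succ_pos k)).mpr h2
  rcases Nat.eq_zero_or_pos k with rfl | hk
  · have := dlen_pos n; omega
  · by_contra hne
    have : dlen n ≤ k := by omega
    have := (dlen_le_iff n k hk).mp this
    omega

-- appending digit strings
theorem toDigits_cat (a : Nat) (ha : 1 ≤ a) : ∀ b : Nat,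
    Nat.toDigits 10 (a * 10 ^ (dlen b) + b) = Nat.toDigits 10 a ++ Nat.toDigits 10 b := by
  intro b
  induction b using Nat.strong_induction_on with
  | _ b ih =>
    by_cases h : b < 10
    · rw [dlen_lt10 h, pow_one]
      rw [show a * 10 + b = 10 * a + b from by ring]
      rw [← Nat.toDigits_append_toDigits (by norm_num : 1 < 10) (by omega : 0 < a) h]
    · rw [dlen_step h]
      have hmod : b % 10 < 10 := Nat.mod_lt _ (by norm_num)
      have hdiv : 0 < b / 10 := Nat.div_pos (by omega) (by norm_num)
      have key : a * 10 ^ (dlen (b / 10) + 1) + b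
          = 10 * (a * 10 ^ (dlen (b / 10)) + b / 10) + b % 10 := by
        have := Nat.div_add_mod b 10
        ring_nf
        omega
      rw [key, ← Nat.toDigits_append_toDigits (by norm_num : 1 < 10) (by positivity) hmod,
        ih (b / 10) (by omega), Nat.toDigits_of_lt_base hmod, List.append_assoc]
      conv_rhs => rw [Nat.toDigits_eq_if (n := b) (by norm_num : (1:Nat) < 10), if_neg h]

-- round trip
theorem myOfChars?_toDigits (n : Nat) :
    myOfChars? (Nat.toDigits 10 n) = some (n : Int) := by
  rw [myOfChars?_digits _ (by have := Nat.length_toDigits_pos (b := 10) (n := n); intro hx; simp [hx] at this) (isDig_toDigits n)]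
  rw [foldl_toDigits]
  norm_num

-- toChars by sign
theorem toChars_nonneg {x : Int} (hx : 0 ≤ x) :
    PySem.Int.toChars x = Nat.toDigits 10 x.toNat := by
  simp [PySem.Int.toChars, not_lt.mpr hx]

theorem toChars_neg {x : Int} (hx : x < 0) :
    PySem.Int.toChars x = '-' :: Nat.toDigits 10 x.natAbs := by
  simp [PySem.Int.toChars, hx]

theorem parse_toChars (x y : Int) :
    PySem.Int.ofStr? (PySem.Int.toStr x ++ PySem.Int.toStr y) =
      myOfChars? (PySem.Int.toChars x ++ PySem.Int.toChars y) := by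
  rw [PySem.Int.ofStr?]
  rw [String.toList_append, PySem.Int.toList_toStr, PySem.Int.toList_toStr, ofChars_eq]

theorem toDigits_zero_eq : Nat.toDigits 10 0 = ['0'] := by
  rw [Nat.toDigits_of_lt_base (by norm_num)]; rfl

-- parse of str(x) + str(i) for a decimal digit i
theorem parse_cat (x i : Int) (h0 : 0 ≤ i) (h9 : i ≤ 9) :
    PySem.Int.ofStr? (PySem.Int.toStr x ++ PySem.Int.toStr i) =
      some (if 0 ≤ x then 10 * x + i else 10 * x - i) := by
  have hit : i.toNat < 10 := by omega
  have hd1 : dlen i.toNat = 1 := dlen_lt10 hit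
  rw [parse_toChars]
  by_cases hx : 0 ≤ x
  · rw [toChars_nonneg hx, toChars_nonneg h0]
    by_cases hx1 : 1 ≤ x
    · rw [show Nat.toDigits 10 x.toNat ++ Nat.toDigits 10 i.toNat
            = Nat.toDigits 10 (x.toNat * 10 ^ (dlen i.toNat) + i.toNat) from
          (toDigits_cat x.toNat (by omega) i.toNat).symm]
      rw [myOfChars?_toDigits, hd1, if_pos hx]
      congr 1
      simp only [pow_one]
      omega
    · have hx0 : x = 0 := by omega
      subst hx0
      rw [show (0:Int).toNat = 0 from rfl, toDigits_zero_eq]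
      rw [List.singleton_append]
      rw [myOfChars?_digits _ (by simp) ?hdig]
      case hdig =>
        intro c hc
        rcases List.mem_cons.mp hc with rfl | hc
        · exact ⟨0, by norm_num, rfl⟩
        · exact isDig_toDigits _ c hc
      rw [List.foldl_cons, show dstep 0 '0' = 0 from rfl, foldl_toDigits, if_pos le_rfl]
      congr 1
      simp only [Nat.zero_mul, Nat.zero_add]
      omega
  · rw [toChars_neg (by omega), toChars_nonneg h0, List.cons_append]
    have hA : Nat.toDigits 10 x.natAbs ≠ [] := by
      have := Nat.length_toDigits_pos (b := 10) (n := x.natAbs)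
      intro h'; rw [h'] at this; simp at this
    rw [myOfChars?_neg_digits _ (fun h' => hA (List.append_eq_nil_iff.mp h').1) ?hdig]
    case hdig =>
      intro c hc
      rcases List.mem_append.mp hc with hc | hc
      · exact isDig_toDigits _ c hc
      · exact isDig_toDigits _ c hc
    rw [List.foldl_append, foldl_toDigits, foldl_toDigits, hd1, if_neg hx]
    congr 1
    simp only [pow_one, Nat.zero_mul, Nat.zero_add]
    omega

-- parse of str(i) + str(x) for 1 ≤ i ≤ 9, 0 ≤ x
theorem parse_pre (i x : Int) (h1 : 1 ≤ i) (h9 : i ≤ 9) (hx : 0 ≤ x) :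
    PySem.Int.ofStr? (PySem.Int.toStr i ++ PySem.Int.toStr x) =
      some (i * ((10 ^ (dlen x.toNat) : Nat) : Int) + x) := by
  rw [parse_toChars, toChars_nonneg (by omega : (0:Int) ≤ i), toChars_nonneg hx]
  rw [show Nat.toDigits 10 i.toNat ++ Nat.toDigits 10 x.toNat
        = Nat.toDigits 10 (i.toNat * 10 ^ (dlen x.toNat) + x.toNat) from
      (toDigits_cat i.toNat (by omega) x.toNat).symm]
  rw [myOfChars?_toDigits]
  congr 1
  generalize (10 ^ (dlen x.toNat) : Nat) = P
  push_cast
  rw [Int.toNat_of_nonneg (show (0:Int) ≤ i by omega), Int.toNat_of_nonneg hx]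

-- ---------- characterising A's goodness test ----------
def Gd (r x : Int) : Bool := fInner r (PySem.Int.toStr x) (PySem.List.pyRange 0 10 1)

theorem pyRange10 : PySem.List.pyRange 0 10 1 = [0,1,2,3,4,5,6,7,8,9] := by decide

theorem fInner_nil (r : Int) (mst : String) : fInner r mst [] = true := rfl

theorem fInner_zero (r : Int) (mst : String) (rest : List Int) (a : Int)
    (hcat : PySem.Int.ofStr? (mst ++ PySem.Int.toStr 0) = some a) :
    fInner r mst (0 :: rest) = if a ≤ r then false else fInner r mst rest := by
  simp only [fInner]; rw [hcat]; simp

theorem fInner_posStep (r : Int) (mst : String) (i : Int) (rest : List Int) (a b : Int)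
    (hi : i ≠ 0)
    (hcat : PySem.Int.ofStr? (mst ++ PySem.Int.toStr i) = some a)
    (hpre : PySem.Int.ofStr? (PySem.Int.toStr i ++ mst) = some b) :
    fInner r mst (i :: rest) =
      if a ≤ r then false else if b ≤ r then false else fInner r mst rest := by
  simp only [fInner]; rw [hcat, hpre]; simp [hi]

theorem Gd_nonpos {r x : Int} (hx : x ≤ 0) (hxr : x < r) : Gd r x = false := by
  unfold Gd
  rw [pyRange10]
  rw [fInner_zero r _ _ _ (parse_cat x 0 (by norm_num) (by norm_num))]
  rw [if_pos (by split <;> omega : (if 0 ≤ x then 10 * x + 0 else 10 * x - 0) ≤ r)]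

theorem Gd_pos {r x : Int} (hx : 1 ≤ x) :
    Gd r x = (decide (r < 10 * x) && decide (r < ((10 ^ (dlen x.toNat) : Nat) : Int) + x)) := by
  have hx0 : 0 ≤ x := by omega
  have hcat : ∀ i : Int, 0 ≤ i → i ≤ 9 →
      PySem.Int.ofStr? (PySem.Int.toStr x ++ PySem.Int.toStr i) = some (10 * x + i) := by
    intro i h0 h9
    rw [parse_cat x i h0 h9, if_pos hx0]
  have hP : 1 ≤ ((10 ^ (dlen x.toNat) : Nat) : Int) := by
    have hPn : 0 < (10 ^ (dlen x.toNat) : Nat) := pow_pos (by norm_num) _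
    exact_mod_cast hPn
  unfold Gd
  rw [pyRange10]
  rw [fInner_zero r _ _ _ (hcat 0 (by norm_num) (by norm_num))]
  rw [fInner_posStep r _ 1 _ _ _ (by norm_num) (hcat 1 (by norm_num) (by norm_num)) (parse_pre 1 x (by norm_num) (by norm_num) hx0)]
  rw [fInner_posStep r _ 2 _ _ _ (by norm_num) (hcat 2 (by norm_num) (by norm_num)) (parse_pre 2 x (by norm_num) (by norm_num) hx0)]
  rw [fInner_posStep r _ 3 _ _ _ (by norm_num) (hcat 3 (by norm_num) (by norm_num)) (parse_pre 3 x (by norm_num) (by norm_num) hx0)]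
  rw [fInner_posStep r _ 4 _ _ _ (by norm_num) (hcat 4 (by norm_num) (by norm_num)) (parse_pre 4 x (by norm_num) (by norm_num) hx0)]
  rw [fInner_posStep r _ 5 _ _ _ (by norm_num) (hcat 5 (by norm_num) (by norm_num)) (parse_pre 5 x (by norm_num) (by norm_num) hx0)]
  rw [fInner_posStep r _ 6 _ _ _ (by norm_num) (hcat 6 (by norm_num) (by norm_num)) (parse_pre 6 x (by norm_num) (by norm_num) hx0)]
  rw [fInner_posStep r _ 7 _ _ _ (by norm_num) (hcat 7 (by norm_num) (by norm_num)) (parse_pre 7 x (by norm_num) (by norm_num) hx0)]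
  rw [fInner_posStep r _ 8 _ _ _ (by norm_num) (hcat 8 (by norm_num) (by norm_num)) (parse_pre 8 x (by norm_num) (by norm_num) hx0)]
  rw [fInner_posStep r _ 9 _ _ _ (by norm_num) (hcat 9 (by norm_num) (by norm_num)) (parse_pre 9 x (by norm_num) (by norm_num) hx0)]
  rw [fInner_nil]
  generalize hPd : ((10 ^ (dlen x.toNat) : Nat) : Int) = P at hP ⊢
  by_cases h1 : 10 * x ≤ r
  · rw [if_pos (show 10 * x + 0 ≤ r from by omega)]
    simp [show ¬ (r < 10 * x) from by omega]
  · by_cases h2 : P + x ≤ r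
    · rw [if_neg (show ¬ (10 * x + 0 ≤ r) from by omega)]
      rw [if_neg (show ¬ (10 * x + 1 ≤ r) from by omega)]
      rw [if_pos (show 1 * P + x ≤ r from by omega)]
      simp [show ¬ (r < P + x) from by omega]
    · rw [if_neg (show ¬ (10 * x + 0 ≤ r) from by omega)]
      rw [if_neg (show ¬ (10 * x + 1 ≤ r) from by omega)]
      rw [if_neg (show ¬ (1 * P + x ≤ r) from by omega)]
      rw [if_neg (show ¬ (10 * x + 2 ≤ r) from by omega)]
      rw [if_neg (show ¬ (2 * P + x ≤ r) from by omega)]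
      rw [if_neg (show ¬ (10 * x + 3 ≤ r) from by omega)]
      rw [if_neg (show ¬ (3 * P + x ≤ r) from by omega)]
      rw [if_neg (show ¬ (10 * x + 4 ≤ r) from by omega)]
      rw [if_neg (show ¬ (4 * P + x ≤ r) from by omega)]
      rw [if_neg (show ¬ (10 * x + 5 ≤ r) from by omega)]
      rw [if_neg (show ¬ (5 * P + x ≤ r) from by omega)]
      rw [if_neg (show ¬ (10 * x + 6 ≤ r) from by omega)]
      rw [if_neg (show ¬ (6 * P + x ≤ r) from by omega)]
      rw [if_neg (show ¬ (10 * x + 7 ≤ r) from by omega)]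
      rw [if_neg (show ¬ (7 * P + x ≤ r) from by omega)]
      rw [if_neg (show ¬ (10 * x + 8 ≤ r) from by omega)]
      rw [if_neg (show ¬ (8 * P + x ≤ r) from by omega)]
      rw [if_neg (show ¬ (10 * x + 9 ≤ r) from by omega)]
      rw [if_neg (show ¬ (9 * P + x ≤ r) from by omega)]
      simp [show r < 10 * x from by omega, show r < P + x from by omega]

-- ---------- the scan of B computes the prepend threshold ----------
theorem altScan_spec (r p : Int) (k : Nat) (hp : p = ((10 ^ (k + 1) : Nat) : Int))
    (inv : ∀ y : Int, 1 ≤ y → y < ((10 ^ k : Nat) : Int) →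
      ((10 ^ (dlen y.toNat) : Nat) : Int) + y ≤ r) :
    1 ≤ altScan r p ∧
    r < ((10 ^ (dlen (altScan r p).toNat) : Nat) : Int) + altScan r p ∧
    (∀ y : Int, 1 ≤ y → y < altScan r p → ((10 ^ (dlen y.toNat) : Nat) : Int) + y ≤ r) := by
  have hk1 : ((10 ^ k : Nat) : Int) ≥ 1 := by exact_mod_cast pow_pos (by norm_num : (0:Nat) < 10) k
  have hkk : ((10 ^ (k+1) : Nat) : Int) = 10 * ((10 ^ k : Nat) : Int) := by push_cast [pow_succ]; ring
  have hp10 : (10:Int) ≤ p := by rw [hp]; omega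
  have hfl : PySem.Int.floordiv p 10 = ((10 ^ k : Nat) : Int) := by
    rw [hp, hkk, PySem.Int.floordiv_eq_ediv_of_pos (by norm_num), mul_comm,
      Int.mul_ediv_cancel _ (by norm_num)]
  rw [altScan, dif_neg (by omega)]
  simp only [hfl]
  by_cases hlt : max ((10 ^ k : Nat) : Int) (r - p + 1) < p
  · rw [if_pos hlt]
    set x := max ((10 ^ k : Nat) : Int) (r - p + 1) with hxdef
    have hx1 : ((10 ^ k : Nat) : Int) ≤ x := le_max_left _ _
    have hx2 : r - p + 1 ≤ x := le_max_right _ _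
    have hdl : dlen x.toNat = k + 1 := dlen_eq_succ (by omega) (by omega)
    refine ⟨by omega, ?_, ?_⟩
    · rw [hdl]
      omega
    · intro y hy1 hy2
      by_cases hyk : y < ((10 ^ k : Nat) : Int)
      · exact inv y hy1 hyk
      · have hdly : dlen y.toNat = k + 1 := dlen_eq_succ (by omega) (by omega)
        rw [hdly]
        omega
  · rw [if_neg hlt]
    have hge : p ≤ r - p + 1 := by omega
    refine altScan_spec r (p * 10) (k + 1) (by rw [hp]; push_cast [pow_succ]; ring) ?_
    intro y hy1 hy2
    by_cases hyk : y < ((10 ^ k : Nat) : Int)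
    · exact inv y hy1 hyk
    · have hdly : dlen y.toNat = k + 1 := dlen_eq_succ (by omega) (by omega)
      rw [hdly]
      omega
termination_by (r - p).toNat
decreasing_by
  have hd := (PySem.Int.floordiv_lt_iff_lt_mul (a := p) (q := p) (by norm_num : (0:Int) < 10)).mpr (by omega)
  omega

-- the combined threshold
def thresh (r : Int) : Int := max 1 (max (PySem.Int.floordiv r 10 + 1) (altScan r 10))

theorem good_iff (r x : Int) (hxr : x < r) : Gd r x = true ↔ thresh r ≤ x := by
  have h1thresh : 1 ≤ thresh r := le_max_left _ _
  by_cases hx : x ≤ 0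
  · rw [Gd_nonpos hx hxr]
    constructor
    · intro h; cases h
    · intro h; omega
  · have hx1 : 1 ≤ x := by omega
    obtain ⟨hs1, hs2, hs3⟩ := altScan_spec r 10 0
      (by norm_num)
      (by intro y hy1 hy2; norm_num at hy2; omega)
    have e1 : r < 10 * x ↔ PySem.Int.floordiv r 10 + 1 ≤ x := by
      rw [Int.add_one_le_iff, PySem.Int.floordiv_lt_iff_lt_mul (by norm_num : (0:Int) < 10), mul_comm]
    have e2 : r < ((10 ^ (dlen x.toNat) : Nat) : Int) + x ↔ altScan r 10 ≤ x := by
      constructor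
      · intro h
        by_contra hcon
        have := hs3 x hx1 (by omega)
        omega
      · intro h
        have hmono : dlen (altScan r 10).toNat ≤ dlen x.toNat := dlen_mono (by omega)
        have hpow : (10 ^ (dlen (altScan r 10).toNat) : Nat) ≤ (10 ^ (dlen x.toNat) : Nat) :=
          Nat.pow_le_pow_right (by norm_num) hmono
        have hpow' : ((10 ^ (dlen (altScan r 10).toNat) : Nat) : Int) ≤ ((10 ^ (dlen x.toNat) : Nat) : Int) := by
          exact_mod_cast hpow
        omega
    rw [Gd_pos hx1]
    simp only [Bool.and_eq_true, decide_eq_true_eq]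
    unfold thresh
    constructor
    · rintro ⟨a, b⟩
      have := e1.mp a
      have := e2.mp b
      omega
    · intro h
      have ha : PySem.Int.floordiv r 10 + 1 ≤ x := by omega
      have hb : altScan r 10 ≤ x := by omega
      exact ⟨e1.mpr ha, e2.mpr hb⟩

-- ---------- the binary search returns the clamped threshold ----------
theorem fLoop_eq (l r ok ng : Int) (h1 : ng < ok) (h2 : ok ≤ r) :
    fLoop l r ok ng = max ng (min ok (thresh r) - 1) := by
  rw [fLoop]
  by_cases hgt : ok - ng > 1
  · rw [dif_pos hgt]
    have hm1 := (PySem.Int.le_floordiv_iff_mul_le (a := ok + ng) (q := ng + 1) (by norm_num : (0:Int) < 2)).mpr (by omega)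
    have hm2 := (PySem.Int.floordiv_lt_iff_lt_mul (a := ok + ng) (q := ok) (by norm_num : (0:Int) < 2)).mpr (by omega)
    show (if Gd r (PySem.Int.floordiv (ok + ng) 2) = true
        then fLoop l r (PySem.Int.floordiv (ok + ng) 2) ng
        else fLoop l r ok (PySem.Int.floordiv (ok + ng) 2)) = max ng (min ok (thresh r) - 1)
    by_cases hg : Gd r (PySem.Int.floordiv (ok + ng) 2) = true
    · rw [if_pos hg, fLoop_eq l r _ ng (by omega) (by omega)]
      have hT := (good_iff r _ (by omega)).mp hg
      omega
    · rw [if_neg hg, fLoop_eq l r ok _ (by omega) h2]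
      have hT : ¬ thresh r ≤ PySem.Int.floordiv (ok + ng) 2 :=
        fun h => hg ((good_iff r _ (by omega)).mpr h)
      omega
  · rw [dif_neg hgt]
    omega
termination_by (ok - ng).toNat
decreasing_by
  · have hm1 := (PySem.Int.le_floordiv_iff_mul_le (a := ok + ng) (q := ng + 1) (by norm_num : (0:Int) < 2)).mpr (by omega)
    have hm2 := (PySem.Int.floordiv_lt_iff_lt_mul (a := ok + ng) (q := ok) (by norm_num : (0:Int) < 2)).mpr (by omega)
    omega
  · have hm1 := (PySem.Int.le_floordiv_iff_mul_le (a := ok + ng) (q := ng + 1) (by norm_num : (0:Int) < 2)).mpr (by omega)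
    have hm2 := (PySem.Int.floordiv_lt_iff_lt_mul (a := ok + ng) (q := ok) (by norm_num : (0:Int) < 2)).mpr (by omega)
    omega

-- ===== VERDICT (by name: the statement is the Claim_ definition above) =====
theorem f_spec : Claim_equal_f := by
  intro l r _
  unfold Spec_f f f_alt
  by_cases hrl : r ≤ l
  · rw [fLoop]; simp only [if_pos hrl]
    rw [dif_neg (by omega)]
    omega
  · rw [if_neg hrl, fLoop_eq l r r (l - 1) (by omega) le_rfl]
    show r - max (l - 1) (min r (thresh r) - 1) = r - (max l (min r (thresh r)) - 1)
    omega
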